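-- pv_equiv track=rewrite | github.com/PatrykPietryka/ASRT-WDI | Kolokwia/Kolokwium_2/2023_2B/rozwiazanie2023_2B.py | f_c
-- ===== SOURCE A (Python) =====
-- def f_c(x): # C(n), zwraca wynik > 0 dla x >= 1
--     n = x
--     rev = 0
--     while n > 0: # odwracamy liczbę
--         rev *= 10
--         rev += n%10
--         n //= 10
--     return rev + x
-- ===== SOURCE B (Python) =====
-- def f_c(x):
--     # place-value sum over the decimal string: digit at string index i contributes 10**i to the reversal
--     if x <= 0:
--         return x
--     return x + sum(int(c) * 10 ** i for i, c in enumerate(str(x)))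
-- ===== Notes on version B (the rewrite author's own statement) =====
-- stated objective: idiomatic
-- what changed: Replaces the div/mod while-loop with its running Horner accumulator by a single comprehension over the decimal string, summing each digit times its place value with sum() and enumerate().
import Mathlib
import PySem

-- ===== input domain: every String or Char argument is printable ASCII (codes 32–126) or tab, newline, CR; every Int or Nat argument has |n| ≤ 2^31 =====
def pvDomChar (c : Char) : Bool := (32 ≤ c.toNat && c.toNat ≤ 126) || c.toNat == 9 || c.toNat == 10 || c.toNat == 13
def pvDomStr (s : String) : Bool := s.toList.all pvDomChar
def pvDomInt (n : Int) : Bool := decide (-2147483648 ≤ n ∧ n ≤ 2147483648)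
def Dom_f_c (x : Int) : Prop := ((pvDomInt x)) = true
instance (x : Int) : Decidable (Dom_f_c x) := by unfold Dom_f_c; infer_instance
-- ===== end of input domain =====

-- B replaces A's arithmetic div/mod reversal loop by a place-value sum over the decimal string (idiomatic, no running Horner accumulator); return values proved equal for all Int inputs.


-- ===== PORT A =====
-- the 'while n > 0' loop: state (n, rev); rev = rev*10 + n%10, n = n//10
def fcLoop (n rev : Int) : Int :=
  if 0 < n then fcLoop (PySem.Int.floordiv n 10) (rev * 10 + PySem.Int.mod n 10) else rev
  termination_by n.toNat
  decreasing_by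
    simp only [PySem.Int.floordiv, Int.fdiv_eq_ediv]
    omega

def f_c (x : Int) : Int := fcLoop x 0 + x

-- ===== PORT B =====
-- sum(int(c) * 10 ** i for i, c in enumerate(str(x))); int(c) never raises here (every c is a
-- decimal digit of str(x)), so its Option is read with getD 0; the enumerate index i is ≥ 0,
-- so 10 ** i is ported as 10 ^ i.toNat
def f_c_alt (x : Int) : Int :=
  if x ≤ 0 then x
  else
    x + (PySem.List.enumerate (PySem.Int.toChars x) 0).foldl
      (fun acc p => acc + (PySem.Int.ofChars? [p.2]).getD 0 * 10 ^ p.1.toNat) 0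

-- ===== PRECONDITION & SPEC =====
def Spec_f_c (x : Int) (out : Int) : Prop := out = f_c_alt x
instance (x : Int) (out : Int) : Decidable (Spec_f_c x out) := by unfold Spec_f_c; infer_instance

-- ===== CLAIM (what is proved, stated in full; the proofs are below) =====
def Claim_equal_f_c : Prop := ∀ (x : Int), Dom_f_c x → Spec_f_c x (f_c x)

-- ===== LEMMAS AND PROOFS =====

-- A's loop over a natural number computes the Horner fold over the base-10 digits (LSF)
theorem fcLoop_eq_foldl (m : Nat) : ∀ (rev : Int),
    fcLoop (m : Int) rev = (Nat.digits 10 m).foldl (fun (a : Int) (d : Nat) => a * 10 + (d : Int)) rev := by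
  induction m using Nat.strong_induction_on with
  | _ m ih =>
    intro rev
    rw [fcLoop]
    by_cases hm : 0 < m
    · have h10 : ((m : Int)).fdiv 10 = ((m / 10 : Nat) : Int) := by
        rw [Int.fdiv_eq_ediv, if_pos (Or.inl (by norm_num : (0:Int) ≤ 10))]; omega
      have hmod : ((m : Int)).fmod 10 = ((m % 10 : Nat) : Int) := by
        rw [Int.fmod_eq_emod]; omega
      simp only [PySem.Int.floordiv, PySem.Int.mod, h10, hmod, show (0:Int) < (m:Int) from by exact_mod_cast hm, if_pos]
      rw [ih (m / 10) (Nat.div_lt_self hm (by norm_num))]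
      rw [Nat.digits_def' (by norm_num : (1:Nat) < 10) hm]
      simp [List.foldl_cons]
    · have : ¬ (0:Int) < (m:Int) := by exact_mod_cast hm
      simp only [this, if_neg, not_false_iff]
      interval_cases m
      simp [Nat.digits_zero]

-- Nat.ofDigits over ℤ base: cons and append (Mathlib's ofDigits_append is ℕ-specific)
theorem ofD_cons (b : Int) (d : Nat) (t : List Nat) :
    Nat.ofDigits b (d :: t) = (d : Int) + b * Nat.ofDigits b t := rfl

theorem ofD_nil (b : Int) : Nat.ofDigits b [] = 0 := rfl

theorem ofD_append (b : Int) (l1 l2 : List Nat) :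
    Nat.ofDigits b (l1 ++ l2) = Nat.ofDigits b l1 + b ^ l1.length * Nat.ofDigits b l2 := by
  induction l1 with
  | nil => simp [Nat.ofDigits]
  | cons d l1 ih => simp only [List.cons_append, ofD_cons, ih, List.length_cons]; ring

-- the Horner fold equals the value of the reversed digit list
theorem horner_foldl (L : List Nat) : ∀ (r : Int),
    L.foldl (fun (a : Int) (d : Nat) => a * 10 + (d : Int)) r
      = r * 10 ^ L.length + (Nat.ofDigits 10 L.reverse : Int) := by
  induction L with
  | nil => intro r; simp [Nat.ofDigits]
  | cons d L ih =>
    intro r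
    simp only [List.foldl_cons, List.reverse_cons, List.length_cons]
    rw [ih]
    rw [ofD_append]
    simp only [ofD_cons, ofD_nil, List.length_reverse]
    ring

-- core's toDigits prints the base-10 digits, most significant first
theorem toDigitsCore_eq (f : Nat) : ∀ (n : Nat) (acc : List Char), 0 < n → n < f →
    Nat.toDigitsCore 10 f n acc = ((Nat.digits 10 n).map Nat.digitChar).reverse ++ acc := by
  induction f with
  | zero => intro n acc h hf; omega
  | succ f ih =>
    intro n acc hn hf
    rw [Nat.toDigitsCore]
    rw [Nat.digits_def' (by norm_num : (1:Nat) < 10) hn]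
    by_cases h0 : n / 10 = 0
    · simp [h0, Nat.digits_zero]
    · have hd : 0 < n / 10 := Nat.pos_of_ne_zero h0
      have hlt : n / 10 < f := by
        have := Nat.div_lt_self hn (by norm_num : 1 < 10); omega
      simp only [h0, if_neg, not_false_iff]
      rw [ih (n / 10) _ hd hlt]
      simp

theorem toDigits_eq (n : Nat) (hn : 0 < n) :
    Nat.toDigits 10 n = ((Nat.digits 10 n).map Nat.digitChar).reverse := by
  have := toDigitsCore_eq (n + 1) n [] hn (by omega)
  simpa [Nat.toDigits] using this

-- int(c) on a single decimal digit character
theorem ofChars_digitChar (d : Nat) (hd : d < 10) :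
    (PySem.Int.ofChars? [Nat.digitChar d]).getD 0 = (d : Int) := by
  interval_cases d <;> decide

-- the enumerate place-value fold computes ofDigits of the digit values in string order
theorem enum_foldl (ds : List Nat) : ∀ (s : Nat) (acc : Int), (∀ d ∈ ds, d < 10) →
    (PySem.List.enumerate (ds.map Nat.digitChar) (s : Int)).foldl
        (fun acc p => acc + (PySem.Int.ofChars? [p.2]).getD 0 * 10 ^ p.1.toNat) acc
      = acc + (Nat.ofDigits 10 ds : Int) * 10 ^ s := by
  induction ds with
  | nil => intro s acc _; simp [PySem.List.enumerate_nil, Nat.ofDigits]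
  | cons d ds ih =>
    intro s acc h
    simp only [List.map_cons, PySem.List.enumerate_cons, List.foldl_cons]
    have hcast : ((s : Int) + 1) = ((s + 1 : Nat) : Int) := by push_cast; ring
    rw [hcast, ih (s + 1) _ (fun d hd => h d (List.mem_cons_of_mem _ hd))]
    rw [ofChars_digitChar d (h d (List.mem_cons_self ..))]
    have hts : ((s : Int)).toNat = s := Int.toNat_natCast s
    rw [hts]
    rw [ofD_cons]
    ring

-- ===== VERDICT (by name: the statement is the Claim_ definition above) =====
theorem f_c_spec : Claim_equal_f_c := by
  intro x _
  unfold Spec_f_c f_c f_c_alt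
  by_cases hx : x ≤ 0
  · rw [fcLoop]
    simp [hx, show ¬ (0 < x) from by omega]
  · have hxpos : 0 < x := by omega
    simp only [hx, if_neg, not_false_iff]
    set n := x.toNat with hn
    have hxn : x = (n : Int) := by omega
    have hnpos : 0 < n := by omega
    -- A side
    rw [hxn, fcLoop_eq_foldl n 0, horner_foldl]
    -- B side
    have htc : PySem.Int.toChars ((n : Int)) = ((Nat.digits 10 n).reverse).map Nat.digitChar := by
      simp only [PySem.Int.toChars]
      rw [if_neg (by omega)]
      rw [Int.toNat_natCast]
      rw [toDigits_eq n hnpos]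
      simp [List.map_reverse]
    rw [htc]
    have henum := enum_foldl ((Nat.digits 10 n).reverse) 0 0
      (by intro d hd; rw [List.mem_reverse] at hd
          exact Nat.digits_lt_base (by norm_num) hd)
    simp only [Nat.cast_zero, pow_zero, mul_one, zero_add] at henum
    rw [henum]
    ring
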